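-- pv_equiv track=rewrite | github.com/happyterMWTH/MACC_ProyectoLogica2 | test.py | regla_1_def
-- ===== SOURCE A (Python) =====
-- N = [5, 4, 3, 2, 1]
--
-- C = [4, 3, 2, 1]
--
-- T = [3, 2, 1]
--
-- def codifica(x, y, z):
--     assert(x in N), "Primer argumento inválido."
--     assert(y in C), "Segundo argumento inválido."
--     assert(z in T), "Tercer argumento inválido."
--     letra = ((2 * z) + (6 * y) + (24 * x)) // 2
--     return letra
--
-- def cod(n):
--     return chr(n + 256)
--
-- def regla_1_def(times):
--     formula = ""
--     inicial = True
--     inicial3 = True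
--     for t in range(times):
--         inicial2 = True
--         for pos in range(len(N)):
--
--             for elem in range(len(C)):
--                 if inicial2:
--                     formula = formula + cod(codifica(pos + 1, elem + 1, 3))
--                     inicial2 = False
--                 else:
--                     formula = formula + cod(codifica(pos + 1, elem + 1, 3)) + 'O'
--         if inicial:
--             inicial = False
--         else:
--             formula = formula + 'Y'
--     return formula
-- ===== SOURCE B (Python) =====
-- N = [5, 4, 3, 2, 1]
--
-- C = [4, 3, 2, 1]
--
-- T = [3, 2, 1]
--
-- def codifica(x, y, z):
--     assert(x in N), "Primer argumento inválido."
--     assert(y in C), "Segundo argumento inválido."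
--     assert(z in T), "Tercer argumento inválido."
--     return ((2 * z) + (6 * y) + (24 * x)) // 2
--
-- def cod(n):
--     return chr(n + 256)
--
-- def regla_1_def(times):
--     # the inner 5x4 double loop of A is independent of t: build its block once
--     codes = [cod(codifica(x, y, 3)) for x in range(1, 6) for y in range(1, 5)]
--     block = codes[0] + ''.join(c + 'O' for c in codes[1:])
--     if times <= 0:
--         return ''
--     return block + (block + 'Y') * (times - 1)
-- ===== Notes on version B (the rewrite author's own statement) =====
-- stated objective: faster
-- what changed: A rebuilds the same fixed code block with a nested double loop and boolean flags on every pass, growing the result by repeated string concatenation; B builds the block once with a comprehension and a join and returns it repeated by string multiplication with 'Y' separators.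
import Mathlib
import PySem

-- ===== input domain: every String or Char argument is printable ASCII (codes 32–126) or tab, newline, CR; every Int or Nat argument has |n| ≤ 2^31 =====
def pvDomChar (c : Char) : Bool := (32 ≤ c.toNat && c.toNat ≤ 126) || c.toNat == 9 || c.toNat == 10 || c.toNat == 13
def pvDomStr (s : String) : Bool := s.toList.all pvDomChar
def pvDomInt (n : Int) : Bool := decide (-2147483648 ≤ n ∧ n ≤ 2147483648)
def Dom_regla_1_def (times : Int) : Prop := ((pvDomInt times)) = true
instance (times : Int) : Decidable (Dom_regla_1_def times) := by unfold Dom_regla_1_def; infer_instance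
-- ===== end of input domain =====

-- B builds the loop-invariant 20-code block once (comprehension + join) and repeats it by
-- string multiplication, replacing A's per-iteration nested loops and boolean flags (objective: simpler).

-- ===== PORT A =====
def pyN : List Int := [5, 4, 3, 2, 1]
def pyC : List Int := [4, 3, 2, 1]

-- Python's asserts in codifica always hold at every call site in both programs
-- (x ∈ 1..5 ⊆ N, y ∈ 1..4 ⊆ C, z = 3 ∈ T), so codifica never raises and is ported as total.
def codifica (x y z : Int) : Int := PySem.Int.floordiv ((2 * z) + (6 * y) + (24 * x)) 2

def cod (n : Int) : String := String.ofList [Char.ofNat (n + 256).toNat]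

def regla_1_def (times : Int) : String :=
  ((PySem.List.pyRange 0 times 1).foldl (fun (st : String × Bool) _t =>
      let inner := (PySem.List.pyRange 0 (pyN.length : Int) 1).foldl (fun st2 pos =>
        (PySem.List.pyRange 0 (pyC.length : Int) 1).foldl (fun (st3 : String × Bool) elem =>
          if st3.2 then (st3.1 ++ cod (codifica (pos + 1) (elem + 1) 3), false)
          else (st3.1 ++ cod (codifica (pos + 1) (elem + 1) 3) ++ "O", st3.2)) st2)
        (st.1, true)
      if st.2 then (inner.1, false) else (inner.1 ++ "Y", st.2))
    ("", true)).1

-- ===== PORT B =====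
def regla_1_def_alt (times : Int) : String :=
  let codes := (PySem.List.pyRange 1 6 1).flatMap (fun x =>
    (PySem.List.pyRange 1 5 1).map (fun y => cod (codifica x y 3)))
  -- codes[0]: codes is non-empty by construction, so Python's indexing never raises
  let block := (PySem.List.pyGet? codes 0).getD "" ++
    PySem.Str.join "" ((PySem.List.slice codes (some 1) none).map (fun c => c ++ "O"))
  if times ≤ 0 then ""
  else block ++ String.ofList (PySem.List.pyRepeat (block ++ "Y").toList (times - 1))

-- ===== PRECONDITION & SPEC =====
def Spec_regla_1_def (times : Int) (out : String) : Prop := out = regla_1_def_alt times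
instance (times : Int) (out : String) : Decidable (Spec_regla_1_def times out) := by unfold Spec_regla_1_def; infer_instance

-- ===== CLAIM (what is proved, stated in full; the proofs are below) =====
def Claim_equal_regla_1_def : Prop := ∀ (times : Int), Dom_regla_1_def times → Spec_regla_1_def times (regla_1_def times)

-- ===== LEMMAS AND PROOFS =====

-- the constant 20-code block both programs produce (A once per iteration, B once)
def pvBlock : String := "ĒĕOĘOěOĞOġOĤOħOĪOĭOİOĳOĶOĹOļOĿOłOŅOňOŋO"

-- A's inner-loop step, named for the lemmas below
def pvStep3 (pos : Int) (st3 : String × Bool) (elem : Int) : String × Bool :=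
  if st3.2 then (st3.1 ++ cod (codifica (pos + 1) (elem + 1) 3), false)
  else (st3.1 ++ cod (codifica (pos + 1) (elem + 1) 3) ++ "O", st3.2)

def pvStep2 (st2 : String × Bool) (pos : Int) : String × Bool :=
  (PySem.List.pyRange 0 (pyC.length : Int) 1).foldl (pvStep3 pos) st2

def pvInner (st : String × Bool) : String × Bool :=
  (PySem.List.pyRange 0 (pyN.length : Int) 1).foldl pvStep2 st

def pvStep1 (st : String × Bool) (_t : Int) : String × Bool :=
  let inner := pvInner (st.1, true)
  if st.2 then (inner.1, false) else (inner.1 ++ "Y", st.2)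

theorem pv_regla_eq_fold (times : Int) :
    regla_1_def times = ((PySem.List.pyRange 0 times 1).foldl pvStep1 ("", true)).1 := rfl

-- a fold whose step only ever appends to the string component commutes with a string prefix
theorem pv_foldl_prefix {α : Type} (step : String × Bool → α → String × Bool)
    (hstep : ∀ (f s : String) (b : Bool) (x : α),
      step (f ++ s, b) x = (f ++ (step (s, b) x).1, (step (s, b) x).2))
    (l : List α) : ∀ (f s : String) (b : Bool),
      l.foldl step (f ++ s, b) = (f ++ (l.foldl step (s, b)).1, (l.foldl step (s, b)).2) := by
  induction l with
  | nil => intro f s b; simp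
  | cons x xs ih =>
    intro f s b
    simp only [List.foldl_cons, hstep]
    exact ih f (step (s, b) x).1 (step (s, b) x).2

theorem pv_step3_prefix (pos : Int) (f s : String) (b : Bool) (elem : Int) :
    pvStep3 pos (f ++ s, b) elem
      = (f ++ (pvStep3 pos (s, b) elem).1, (pvStep3 pos (s, b) elem).2) := by
  cases b <;> simp [pvStep3, String.append_assoc]

theorem pv_step2_prefix (f s : String) (b : Bool) (pos : Int) :
    pvStep2 (f ++ s, b) pos = (f ++ (pvStep2 (s, b) pos).1, (pvStep2 (s, b) pos).2) :=
  pv_foldl_prefix _ (pv_step3_prefix pos) _ f s b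

-- A's whole inner double loop appends exactly pvBlock and clears the flag
theorem pv_inner_eq (f : String) : pvInner (f, true) = (f ++ pvBlock, false) := by
  have h0 : pvInner ("", true) = (pvBlock, false) := by decide
  have h := pv_foldl_prefix pvStep2 pv_step2_prefix
    (PySem.List.pyRange 0 (pyN.length : Int) 1) f "" true
  simp only [pvInner] at h0 ⊢
  rw [show (f, true) = (f ++ "", true) by simp, h, h0]

-- one outer iteration from a flag-cleared state appends "block + 'Y'"
theorem pv_step1_false (f : String) (t : Int) :
    pvStep1 (f, false) t = (f ++ pvBlock ++ "Y", false) := by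
  simp [pvStep1, pv_inner_eq]

theorem pv_foldl_false (l : List Int) : ∀ (f : String),
    l.foldl pvStep1 (f, false) = (f ++ String.ofList ((List.replicate l.length (pvBlock ++ "Y").toList).flatten), false) := by
  induction l with
  | nil => intro f; simp
  | cons x xs ih =>
    intro f
    rw [List.foldl_cons, pv_step1_false, ih]
    refine Prod.ext ?_ rfl
    show _ = f ++ String.ofList (List.replicate (xs.length + 1) (pvBlock ++ "Y").toList).flatten
    rw [List.replicate_succ, List.flatten_cons, String.ofList_append, String.ofList_toList]
    simp [String.append_assoc]

-- the outer fold over range(n+1), in closed form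
theorem pv_outer (n : Nat) :
    ((PySem.List.pyRange 0 ((n : Int) + 1) 1).foldl pvStep1 ("", true)).1
      = pvBlock ++ String.ofList (PySem.List.pyRepeat (pvBlock ++ "Y").toList (n : Int)) := by
  have hsplit : PySem.List.pyRange 0 ((n : Int) + 1) 1
      = PySem.List.pyRange 0 1 1 ++ PySem.List.pyRange 1 ((n : Int) + 1) 1 :=
    PySem.List.pyRange_one_append 0 1 ((n : Int) + 1) (by omega) (by omega)
  have h1 : (PySem.List.pyRange 0 1 1).foldl pvStep1 ("", true) = (pvBlock, false) := by decide
  have hlen : (PySem.List.pyRange 1 ((n : Int) + 1) 1).length = n := by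
    rw [PySem.List.length_pyRange_one]; omega
  rw [hsplit, List.foldl_append, h1, pv_foldl_false, hlen]
  simp [PySem.List.pyRepeat]

theorem pv_alt_pos (n : Nat) :
    regla_1_def_alt ((n : Int) + 1)
      = pvBlock ++ String.ofList (PySem.List.pyRepeat (pvBlock ++ "Y").toList (n : Int)) := by
  have hb : ((PySem.List.pyGet? ((PySem.List.pyRange 1 6 1).flatMap (fun x =>
        (PySem.List.pyRange 1 5 1).map (fun y => cod (codifica x y 3)))) 0).getD "" ++
      PySem.Str.join "" ((PySem.List.slice ((PySem.List.pyRange 1 6 1).flatMap (fun x =>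
        (PySem.List.pyRange 1 5 1).map (fun y => cod (codifica x y 3)))) (some 1) none).map
        (fun c => c ++ "O"))) = pvBlock := by decide
  have hnot : ¬ ((n : Int) + 1 ≤ 0) := by omega
  simp only [regla_1_def_alt, hb, if_neg hnot, add_sub_cancel_right]

-- ===== VERDICT (by name: the statement is the Claim_ definition above) =====
theorem regla_1_def_spec : Claim_equal_regla_1_def := by
  intro times _
  unfold Spec_regla_1_def
  by_cases h : times ≤ 0
  · rw [pv_regla_eq_fold, PySem.List.pyRange_one_eq_nil h]
    simp [regla_1_def_alt, h]
  · obtain ⟨n, hn⟩ : ∃ n : Nat, times = (n : Int) + 1 :=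
      ⟨(times - 1).toNat, by omega⟩
    rw [hn, pv_regla_eq_fold, pv_outer, pv_alt_pos]
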